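-- pv_equiv track=rewrite | github.com/ikoliveira/MineWars | src/partes_logicas.py | prepara_caminho
-- ===== SOURCE A (Python) =====
-- def prepara_caminho(lista_matriz, lista_indices):
--     """
--     Abre a matriz para garantir que exista ao menos um caminho livre.
--     :param lista_matriz: mapa.
--     :param lista_indices:
--     :return: Void.
--     """
--     for linha in range(len(lista_matriz)):
--         for coluna in range(len(lista_matriz)):
--             if linha != 0:
--                 if lista_indices[linha - 1] > lista_indices[linha]:
--                     if lista_indices[linha] < coluna <= lista_indices[linha - 1]:
--                         lista_matriz[linha].insert(coluna, 0)
--                         lista_matriz[linha].pop(coluna + 1)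
--                 else:
--                     if lista_indices[linha - 1] <= coluna < lista_indices[linha]:
--                         lista_matriz[linha].insert(coluna, 0)
--                         lista_matriz[linha].pop(coluna + 1)
--     return lista_matriz
-- ===== SOURCE B (Python) =====
-- def prepara_caminho(lista_matriz, lista_indices):
--     """One pass over consecutive index pairs: each affected row is rebuilt by list
--     surgery (prefix + zero block + suffix) from a clamped arithmetic interval; no
--     nested column loop and no per-cell test.
--     (A mutates lista_matriz in place; B returns a fresh matrix - equal return value.)"""
--     n = len(lista_matriz)
--     if n == 0:
--         return []
--     out = [list(lista_matriz[0])]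
--     for row, a, b in zip(lista_matriz[1:], lista_indices, lista_indices[1:]):
--         lo, hi = (b + 1, a + 1) if a > b else (a, b)
--         lo = max(lo, 0)
--         hi = min(hi, n)
--         if hi > lo:
--             out.append(row[:lo] + [0] * (hi - lo) + row[hi:])
--         else:
--             out.append(list(row))
--     return out
-- ===== Notes on version B (the rewrite author's own statement) =====
-- stated objective: faster
-- what changed: B replaces A's nested row*column loop with per-cell insert/pop mutation by a single pass over zip(lista_matriz[1:], lista_indices, lista_indices[1:]): each row's clamped zero-interval is computed arithmetically and the row is rebuilt once by slice concatenation (prefix + zero block + suffix), with no column loop and no per-cell test.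
import Mathlib
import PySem

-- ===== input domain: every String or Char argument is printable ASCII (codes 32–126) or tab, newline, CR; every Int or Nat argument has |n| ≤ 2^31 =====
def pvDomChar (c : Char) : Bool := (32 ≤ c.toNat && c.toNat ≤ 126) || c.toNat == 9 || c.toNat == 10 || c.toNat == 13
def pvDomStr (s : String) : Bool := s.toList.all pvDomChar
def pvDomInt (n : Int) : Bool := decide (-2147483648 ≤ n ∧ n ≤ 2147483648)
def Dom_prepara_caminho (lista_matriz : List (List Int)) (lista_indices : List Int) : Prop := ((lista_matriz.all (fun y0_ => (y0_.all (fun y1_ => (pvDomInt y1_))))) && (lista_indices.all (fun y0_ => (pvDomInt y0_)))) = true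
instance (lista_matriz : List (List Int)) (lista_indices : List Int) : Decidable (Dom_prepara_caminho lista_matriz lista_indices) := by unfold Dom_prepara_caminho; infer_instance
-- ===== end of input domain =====

-- B replaces A's nested row*column insert/pop loop by one pass over consecutive index
-- pairs, rebuilding each row once by slice concatenation from its clamped zero-interval;
-- Python A mutates lista_matriz in place while B returns a fresh matrix, so the
-- equivalence proved here is about the RETURN value.

-- ===== PORT A =====
def prepara_caminho (lista_matriz : List (List Int)) (lista_indices : List Int) : List (List Int) :=
  (List.range lista_matriz.length).foldl (fun mat (linha : Nat) =>
    (List.range lista_matriz.length).foldl (fun mat (coluna : Nat) =>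
      if linha ≠ 0 then
        if PySem.List.pyGetD lista_indices ((linha : Int) - 1) 0 > PySem.List.pyGetD lista_indices (linha : Int) 0 then
          if PySem.List.pyGetD lista_indices (linha : Int) 0 < (coluna : Int) ∧ (coluna : Int) ≤ PySem.List.pyGetD lista_indices ((linha : Int) - 1) 0 then
            mat.modify linha (fun row =>
              match PySem.List.pop? (PySem.List.insert row (coluna : Int) 0) ((coluna : Int) + 1) with
              | some r => r.2
              | none => row)
          else mat
        else
          if PySem.List.pyGetD lista_indices ((linha : Int) - 1) 0 ≤ (coluna : Int) ∧ (coluna : Int) < PySem.List.pyGetD lista_indices (linha : Int) 0 then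
            mat.modify linha (fun row =>
              match PySem.List.pop? (PySem.List.insert row (coluna : Int) 0) ((coluna : Int) + 1) with
              | some r => r.2
              | none => row)
          else mat
      else mat) mat) lista_matriz

-- ===== PORT B =====
-- Source B's loop body for one (row, a, b) triple: clamped interval, then slice surgery.
-- row[:lo] / row[hi:] with 0 ≤ lo, 0 < hi are exactly take/drop (Python clamps, so do they).
def pcSplice (row : List Int) (a b : Int) (n : Int) : List Int :=
  let lohi := if a > b then (b + 1, a + 1) else (a, b)
  let lo := max lohi.1 0
  let hi := min lohi.2 n
  if hi > lo then row.take lo.toNat ++ List.replicate (hi - lo).toNat 0 ++ row.drop hi.toNat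
  else row

def prepara_caminho_alt (lista_matriz : List (List Int)) (lista_indices : List Int) : List (List Int) :=
  let n : Int := lista_matriz.length
  if lista_matriz.length = 0 then []
  else
    lista_matriz.headD [] ::
      ((lista_matriz.drop 1).zip (lista_indices.zip (lista_indices.drop 1))).map
        (fun t => pcSplice t.1 t.2.1 t.2.2 n)

-- ===== PRECONDITION & SPEC =====
-- columns A zeroes in row i: the interval determined by lista_indices[i-1], lista_indices[i]
abbrev pcTouched (lista_indices : List Int) (i c : Nat) : Prop :=
  let a := lista_indices.getD (i - 1) 0
  let b := lista_indices.getD i 0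
  if a > b then b < (c : Int) ∧ (c : Int) ≤ a else a ≤ (c : Int) ∧ (c : Int) < b

-- Pre_ = exactly where Python A returns normally: with ≥ 2 rows it reads lista_indices[0..len-1]
-- (IndexError if lista_indices is shorter), and every zeroed column must be an existing index
-- of its row (insert followed by pop(coluna + 1) raises IndexError otherwise).
def Pre_prepara_caminho (lista_matriz : List (List Int)) (lista_indices : List Int) : Prop :=
  (lista_matriz.length ≤ 1 ∨ lista_matriz.length ≤ lista_indices.length) ∧
  ∀ i < lista_matriz.length, ∀ c < lista_matriz.length,
    1 ≤ i → pcTouched lista_indices i c → c < (lista_matriz.getD i []).length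

instance (lista_matriz : List (List Int)) (lista_indices : List Int) : Decidable (Pre_prepara_caminho lista_matriz lista_indices) := by
  unfold Pre_prepara_caminho; infer_instance

def pvWitness_prepara_caminho : List (List Int) × List Int :=
  ([[1, 1, 1], [1, 1, 1], [1, 1, 1]], [0, 2, 1])

def Spec_prepara_caminho (lista_matriz : List (List Int)) (lista_indices : List Int) (out : List (List Int)) : Prop := out = prepara_caminho_alt lista_matriz lista_indices
instance (lista_matriz : List (List Int)) (lista_indices : List Int) (out : List (List Int)) : Decidable (Spec_prepara_caminho lista_matriz lista_indices out) := by unfold Spec_prepara_caminho; infer_instance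

-- ===== CLAIM =====
def Claim_equal_prepara_caminho : Prop := ∀ (lista_matriz : List (List Int)) (lista_indices : List Int), Dom_prepara_caminho lista_matriz lista_indices → Pre_prepara_caminho lista_matriz lista_indices → Spec_prepara_caminho lista_matriz lista_indices (prepara_caminho lista_matriz lista_indices)

-- ===== LEMMAS AND PROOFS =====
-- Python's row.insert(c, 0); row.pop(c + 1) as A's port performs it
def pcRowOp (c : Nat) (row : List Int) : List Int :=
  match PySem.List.pop? (PySem.List.insert row (c : Int) 0) ((c : Int) + 1) with
  | some r => r.2
  | none => row

lemma pc_eraseIdx (row : List Int) (c : Nat) (h : c < row.length) :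
    (row.take c ++ 0 :: row.drop c).eraseIdx (c + 1) = row.set c 0 := by
  induction row generalizing c with
  | nil => simp at h
  | cons x xs ih =>
    cases c with
    | zero => simp [List.eraseIdx]
    | succ m => simp_all

-- row.insert(c, 0); row.pop(c + 1) is exactly row[c] = 0 when c < len(row)
lemma pcRowOp_eq_set (c : Nat) (row : List Int) (h : c < row.length) :
    pcRowOp c row = row.set c 0 := by
  have hins : PySem.List.insert row (c : Int) 0 = row.take c ++ 0 :: row.drop c := by
    have : (if (c : Int) < 0 then max ((c : Int) + (row.length : Int)) 0
            else min (c : Int) (row.length : Int)).toNat = c := by split <;> omega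
    simp [PySem.List.insert, PySem.List.sliceIndices, this]
  have hcast : ((c : Int) + 1) = ((c + 1 : Nat) : Int) := by push_cast; ring
  unfold pcRowOp
  rw [hins, hcast, PySem.List.pop?_natCast _ (c + 1) (by simp; omega)]
  exact pc_eraseIdx row c h

-- row-level fold of conditional set steps, elementwise
lemma pc_rowfold_getElem? (ks : List Nat) (P : Nat → Prop) [DecidablePred P] (row : List Int)
    (hsafe : ∀ c ∈ ks, P c → c < row.length) (j : Nat) :
    (ks.foldl (fun r c => if P c then pcRowOp c r else r) row)[j]? =
      if j ∈ ks ∧ P j then (if j < row.length then some 0 else none) else row[j]? := by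
  induction ks generalizing row with
  | nil => simp
  | cons k ks ih =>
    by_cases hk : P k
    · have hkl : k < row.length := hsafe k (by simp) hk
      simp only [List.foldl_cons, if_pos hk, pcRowOp_eq_set k row hkl]
      rw [ih _ (fun c hc hp => by rw [List.length_set]; exact hsafe c (by simp [hc]) hp)]
      by_cases hj : j ∈ ks ∧ P j
      · simp [hj, List.length_set]
      · simp only [if_neg hj, List.getElem?_set]
        by_cases hjk : j = k
        · subst hjk; simp [hk, hkl]
        · simp [hj, Ne.symm hjk, hjk]
    · simp only [List.foldl_cons, if_neg hk]
      rw [ih _ (fun c hc hp => hsafe c (by simp [hc]) hp)]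
      by_cases hjk : j = k
      · subst hjk; simp [hk]
      · simp [hjk]

-- matrix-level fold of conditional modify steps (nodup index list)
lemma pc_matfold_getElem? {α : Type} (ks : List Nat) (hnd : ks.Nodup) (P : Nat → Prop)
    [DecidablePred P] (F : Nat → α → α) (m : List α) (j : Nat) :
    (ks.foldl (fun mat i => if P i then mat.modify i (F i) else mat) m)[j]? =
      if j ∈ ks ∧ P j then m[j]?.map (F j) else m[j]? := by
  induction ks generalizing m with
  | nil => simp
  | cons k ks ih =>
    have hnd' := hnd.of_cons
    simp only [List.foldl_cons]
    by_cases hk : P k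
    · rw [if_pos hk, ih hnd']
      by_cases hj : j ∈ ks ∧ P j
      · have hjk : k ≠ j := fun h => (List.nodup_cons.mp hnd).1 (h ▸ hj.1)
        rw [if_pos hj, List.getElem?_modify]
        have : j ∈ k :: ks ∧ P j := ⟨by simp [hj.1], hj.2⟩
        rw [if_pos this]
        cases m[j]? <;> simp [hjk]
      · rw [if_neg hj, List.getElem?_modify]
        by_cases hjk : j = k
        · subst hjk
          have : j ∈ j :: ks ∧ P j := ⟨by simp, hk⟩
          rw [if_pos this]
          cases m[j]? <;> simp
        · have : ¬ (j ∈ k :: ks ∧ P j) := fun h => hj ⟨(List.mem_cons.mp h.1).resolve_left hjk, h.2⟩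
          rw [if_neg this]
          cases m[j]? <;> simp [Ne.symm hjk]
    · rw [if_neg hk, ih hnd']
      by_cases hjk : j = k
      · subst hjk; simp [hk]
      · simp [hjk]

abbrev pcCondA (idx : List Int) (i c : Nat) : Prop :=
  if PySem.List.pyGetD idx ((i : Int) - 1) 0 > PySem.List.pyGetD idx (i : Int) 0 then
    PySem.List.pyGetD idx (i : Int) 0 < (c : Int) ∧ (c : Int) ≤ PySem.List.pyGetD idx ((i : Int) - 1) 0
  else
    PySem.List.pyGetD idx ((i : Int) - 1) 0 ≤ (c : Int) ∧ (c : Int) < PySem.List.pyGetD idx (i : Int) 0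

lemma pcCondA_eq_touched (idx : List Int) (i c : Nat) (hi : 1 ≤ i) :
    pcCondA idx i c ↔ pcTouched idx i c := by
  have h1 : ((i : Int) - 1) = ((i - 1 : Nat) : Int) := by omega
  unfold pcCondA pcTouched
  rw [h1, PySem.List.pyGetD_natCast, PySem.List.pyGetD_natCast]

-- A's inner loop over columns = one modify with the row-level fold
lemma pc_inner_eq (idx : List Int) (n i : Nat) (mat : List (List Int)) :
    (List.range n).foldl (fun mat (coluna : Nat) =>
      if i ≠ 0 then
        if PySem.List.pyGetD idx ((i : Int) - 1) 0 > PySem.List.pyGetD idx (i : Int) 0 then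
          if PySem.List.pyGetD idx (i : Int) 0 < (coluna : Int) ∧ (coluna : Int) ≤ PySem.List.pyGetD idx ((i : Int) - 1) 0 then
            mat.modify i (fun row =>
              match PySem.List.pop? (PySem.List.insert row (coluna : Int) 0) ((coluna : Int) + 1) with
              | some r => r.2
              | none => row)
          else mat
        else
          if PySem.List.pyGetD idx ((i : Int) - 1) 0 ≤ (coluna : Int) ∧ (coluna : Int) < PySem.List.pyGetD idx (i : Int) 0 then
            mat.modify i (fun row =>
              match PySem.List.pop? (PySem.List.insert row (coluna : Int) 0) ((coluna : Int) + 1) with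
              | some r => r.2
              | none => row)
          else mat
      else mat) mat =
    if i ≠ 0 then
      mat.modify i (fun row => (List.range n).foldl (fun r c => if pcCondA idx i c then pcRowOp c r else r) row)
    else mat := by
  by_cases hi : i ≠ 0
  · have hstep : (fun (mat : List (List Int)) (coluna : Nat) =>
        if i ≠ 0 then
          if PySem.List.pyGetD idx ((i : Int) - 1) 0 > PySem.List.pyGetD idx (i : Int) 0 then
            if PySem.List.pyGetD idx (i : Int) 0 < (coluna : Int) ∧ (coluna : Int) ≤ PySem.List.pyGetD idx ((i : Int) - 1) 0 then
              mat.modify i (fun row =>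
                match PySem.List.pop? (PySem.List.insert row (coluna : Int) 0) ((coluna : Int) + 1) with
                | some r => r.2
                | none => row)
            else mat
          else
            if PySem.List.pyGetD idx ((i : Int) - 1) 0 ≤ (coluna : Int) ∧ (coluna : Int) < PySem.List.pyGetD idx (i : Int) 0 then
              mat.modify i (fun row =>
                match PySem.List.pop? (PySem.List.insert row (coluna : Int) 0) ((coluna : Int) + 1) with
                | some r => r.2
                | none => row)
            else mat
        else mat) =
        (fun mat c => mat.modify i (fun r => if pcCondA idx i c then pcRowOp c r else r)) := by
      funext mat c
      simp only [if_pos hi]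
      unfold pcCondA pcRowOp
      split_ifs with h1 h2 h3 <;> first | rfl | exact (List.modify_id i mat).symm
    rw [hstep, if_pos hi]
    induction n with
    | zero => exact (List.modify_id i mat).symm
    | succ k ihk =>
      rw [List.range_succ, List.foldl_append, ihk, List.foldl_cons, List.foldl_nil,
        List.modify_modify_eq]
      congr 1
      funext row
      rw [List.foldl_append, List.foldl_cons, List.foldl_nil]
      rfl
  · simp only [if_neg hi]
    simp at hi
    subst hi
    simp

-- elementwise view of the slice surgery prefix ++ zeros ++ suffix
lemma pc_splice_getElem? (row : List Int) (lo hi : Nat) (hlh : lo < hi) (hle : hi ≤ row.length) (c : Nat) :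
    (row.take lo ++ List.replicate (hi - lo) 0 ++ row.drop hi)[c]? =
      if lo ≤ c ∧ c < hi then some (0 : Int) else row[c]? := by
  have hlo : (row.take lo).length = lo := by simp; omega
  rcases lt_or_ge c lo with h1 | h1
  · rw [List.getElem?_append_left (by simp [hlo]; omega), List.getElem?_append_left (by omega),
      List.getElem?_take]
    simp [h1]
  · rcases lt_or_ge c hi with h2 | h2
    · rw [List.getElem?_append_left (by simp [hlo]; omega), List.getElem?_append_right (by omega)]
      rw [hlo, List.getElem?_replicate]
      simp only [if_pos (And.intro h1 h2)]
      have : c - lo < hi - lo := by omega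
      simp [this]
    · rw [List.getElem?_append_right (by simp [hlo]; omega)]
      have : ((row.take lo ++ List.replicate (hi - lo) 0).length) = hi := by simp; omega
      rw [this, List.getElem?_drop]
      have : hi + (c - hi) = c := by omega
      rw [this]
      have : ¬ (lo ≤ c ∧ c < hi) := by omega
      simp [this]

-- A's column fold over one row, when its condition is the interval [lo, hi), is the
-- slice surgery clamped to [max lo 0, min hi n)
lemma pc_core (row : List Int) (lo hi : Int) (n : Nat) (Q : Nat → Prop) [DecidablePred Q]
    (hQ : ∀ c : Nat, Q c ↔ (lo ≤ (c : Int) ∧ (c : Int) < hi))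
    (hsr : ∀ c < n, Q c → c < row.length) :
    (List.range n).foldl (fun r c => if Q c then pcRowOp c r else r) row =
      (if min hi (n : Int) > max lo 0 then
        row.take (max lo 0).toNat ++ List.replicate (min hi (n : Int) - max lo 0).toNat 0
          ++ row.drop (min hi (n : Int)).toNat
       else row) := by
  have hsafe : ∀ c ∈ List.range n, Q c → c < row.length := fun c hc hq =>
    hsr c (List.mem_range.mp hc) hq
  set lo2 := max lo 0 with hlo2
  set hi2 := min hi (n : Int) with hhi2
  have hl0 : 0 ≤ lo2 := by omega
  by_cases hne : hi2 > lo2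
  · have hkl : ((hi2 - 1).toNat : Int) = hi2 - 1 := Int.toNat_of_nonneg (by omega)
    have hhiN : hi2.toNat ≤ row.length := by
      have hq : Q (hi2 - 1).toNat := (hQ _).mpr (by constructor <;> omega)
      have := hsr (hi2 - 1).toNat (by omega) hq
      omega
    rw [if_pos hne]
    apply List.ext_getElem?
    intro c
    have hsub : (hi2 - lo2).toNat = hi2.toNat - lo2.toNat := by omega
    rw [hsub, pc_rowfold_getElem? _ _ row hsafe c,
      pc_splice_getElem? row lo2.toNat hi2.toNat (by omega) hhiN c]
    have hiff : (c ∈ List.range n ∧ Q c) ↔ (lo2.toNat ≤ c ∧ c < hi2.toNat) := by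
      rw [List.mem_range, hQ c]
      omega
    by_cases hc : lo2.toNat ≤ c ∧ c < hi2.toNat
    · rw [if_pos hc, if_pos (hiff.mpr hc), if_pos (by omega)]
    · rw [if_neg hc, if_neg (fun h => hc (hiff.mp h))]
  · rw [if_neg hne]
    apply List.ext_getElem?
    intro c
    rw [pc_rowfold_getElem? _ _ row hsafe c]
    have : ¬ (c ∈ List.range n ∧ Q c) := by
      rw [List.mem_range, hQ c]
      omega
    rw [if_neg this]

-- A's column fold on one row equals B's slice surgery for that row
lemma pc_row_eq (idx : List Int) (n j : Nat) (hj : 1 ≤ j) (row : List Int)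
    (hsr : ∀ c < n, pcTouched idx j c → c < row.length) :
    (List.range n).foldl (fun r c => if pcCondA idx j c then pcRowOp c r else r) row =
      pcSplice row (idx.getD (j - 1) 0) (idx.getD j 0) (n : Int) := by
  have hsr' : ∀ c < n, pcCondA idx j c → c < row.length := fun c hc hq =>
    hsr c hc ((pcCondA_eq_touched idx j c hj).mp hq)
  by_cases hab : idx.getD (j - 1) 0 > idx.getD j 0
  · rw [pc_core row (idx.getD j 0 + 1) (idx.getD (j - 1) 0 + 1) n (pcCondA idx j)
      (fun c => by
        rw [pcCondA_eq_touched idx j c hj]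
        unfold pcTouched
        rw [if_pos hab]
        omega) hsr']
    simp only [pcSplice, if_pos hab]
  · rw [pc_core row (idx.getD (j - 1) 0) (idx.getD j 0) n (pcCondA idx j)
      (fun c => by
        rw [pcCondA_eq_touched idx j c hj]
        unfold pcTouched
        rw [if_neg hab]) hsr']
    simp only [pcSplice, if_neg hab]

lemma pc_main (m : List (List Int)) (idx : List Int) (hpre : Pre_prepara_caminho m idx) :
    prepara_caminho m idx = prepara_caminho_alt m idx := by
  have hA : prepara_caminho m idx =
      (List.range m.length).foldl (fun mat i =>
        if i ≠ 0 then
          mat.modify i (fun row =>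
            (List.range m.length).foldl (fun r c => if pcCondA idx i c then pcRowOp c r else r) row)
        else mat) m := by
    unfold prepara_caminho
    exact congrArg (fun f => List.foldl f m (List.range m.length))
      (funext fun mat => funext fun linha => pc_inner_eq idx m.length linha mat)
  cases m with
  | nil => rw [hA]; rfl
  | cons r0 rest =>
    set m := r0 :: rest with hm
    set n := m.length with hn
    have hB : prepara_caminho_alt m idx =
        m.headD [] ::
          ((m.drop 1).zip (idx.zip (idx.drop 1))).map
            (fun t => pcSplice t.1 t.2.1 t.2.2 (n : Int)) := by
      unfold prepara_caminho_alt
      rw [if_neg (by simp [hm])]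
    rw [hA, hB]
    apply List.ext_getElem?
    intro j
    rw [pc_matfold_getElem? _ List.nodup_range _ _ m j]
    cases j with
    | zero =>
      rw [if_neg (fun h => h.2 rfl)]
      simp [hm]
    | succ k =>
      have hcons : (m.headD [] :: ((m.drop 1).zip (idx.zip (idx.drop 1))).map
          (fun t => pcSplice t.1 t.2.1 t.2.2 (n : Int)))[k + 1]? =
          (((m.drop 1).zip (idx.zip (idx.drop 1))).map
            (fun t => pcSplice t.1 t.2.1 t.2.2 (n : Int)))[k]? := rfl
      rw [hcons]
      by_cases hjn : k + 1 < n
    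
      · have hL : n ≤ idx.length := by
          rcases hpre.1 with h | h
          · omega
          · exact h
        have hzk : ((m.drop 1).zip (idx.zip (idx.drop 1)))[k]? =
            some ((m.drop 1)[k]'(by simp; omega), ((idx.zip (idx.drop 1))[k]'(by simp; omega))) := by
          rw [List.getElem?_eq_getElem (by simp; omega), List.getElem_zip]
        rw [List.getElem?_map, hzk]
        simp only [Option.map_some]
        have hdropm : (m.drop 1)[k]'(by simp; omega) = m[k + 1]'(by omega) := by
          rw [List.getElem_drop]
          congr 1
          omega
        have hzidx : ((idx.zip (idx.drop 1))[k]'(by simp; omega)) =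
            (idx[k]'(by omega), (idx.drop 1)[k]'(by simp; omega)) := List.getElem_zip
        have hdropi : (idx.drop 1)[k]'(by simp; omega) = idx[k + 1]'(by omega) := by
          rw [List.getElem_drop]
          congr 1
          omega
        rw [if_pos ⟨List.mem_range.mpr hjn, Nat.succ_ne_zero k⟩,
          List.getElem?_eq_getElem (by omega), Option.map_some]
        refine congrArg some ?_
        rw [hdropm, hzidx, hdropi]
        have hrow := pc_row_eq idx n (k + 1) (by omega) (m[k + 1]'(by omega))
          (fun c hc ht => by
            have := hpre.2 (k + 1) (by omega) c hc (by omega) ht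
            rwa [List.getD_eq_getElem m [] (by omega)] at this)
        rw [hrow]
        have e1 : idx.getD (k + 1 - 1) 0 = idx[k]'(by omega) := by
          rw [Nat.add_sub_cancel, List.getD_eq_getElem idx 0 (show k < idx.length by omega)]
        have e2 : idx.getD (k + 1) 0 = idx[k + 1]'(by omega) := by
          rw [List.getD_eq_getElem idx 0 (show k + 1 < idx.length by omega)]
        rw [e1, e2]
      · have hlen : (((m.drop 1).zip (idx.zip (idx.drop 1))).map
            (fun t => pcSplice t.1 t.2.1 t.2.2 (n : Int))).length ≤ k := by
          simp only [List.length_map, List.length_zip, List.length_drop]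
          omega
        rw [List.getElem?_eq_none hlen, List.getElem?_eq_none (by omega)]
        split_ifs <;> simp

-- ===== VERDICT =====
theorem prepara_caminho_spec : Claim_equal_prepara_caminho := by
  intro lista_matriz lista_indices _ hpre
  unfold Spec_prepara_caminho
  exact pc_main lista_matriz lista_indices hpre
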